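-- pv_equiv track=rewrite | github.com/mahi07codes/assignment1 | negetive.py | fn
-- ===== SOURCE A (Python) =====
-- def fn(arr1):
--     st = []
--     sum = 0
--     for i in arr1:
--         if i<0:
--             sum += i
--         else:
--             if sum !=0:
--                 st.append(sum)
--             sum=0
--     if sum !=0:
--         st.append(sum)
--
--     return min(st) if st else -1
-- ===== SOURCE B (Python) =====
-- def fn(arr1):
--     sums = []
--     i, n = 0, len(arr1)
--     while i < n:
--         if arr1[i] < 0:
--             j, s = i, 0
--             while j < n and arr1[j] < 0:
--                 s += arr1[j]
--                 j += 1
--             sums.append(s)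
--             i = j
--         else:
--             i += 1
--     return min(sums) if sums else -1
-- ===== Notes on version B (the rewrite author's own statement) =====
-- stated objective: alternative
-- what changed: Replaces the accumulate-and-flush state machine (running sum flushed on non-negatives and once after the loop) by a group-then-reduce two-level scan: an outer index scan locates each maximal run of negatives, an inner loop sums that run in one go, and the answer is the min of the collected run-sums.
import Mathlib
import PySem

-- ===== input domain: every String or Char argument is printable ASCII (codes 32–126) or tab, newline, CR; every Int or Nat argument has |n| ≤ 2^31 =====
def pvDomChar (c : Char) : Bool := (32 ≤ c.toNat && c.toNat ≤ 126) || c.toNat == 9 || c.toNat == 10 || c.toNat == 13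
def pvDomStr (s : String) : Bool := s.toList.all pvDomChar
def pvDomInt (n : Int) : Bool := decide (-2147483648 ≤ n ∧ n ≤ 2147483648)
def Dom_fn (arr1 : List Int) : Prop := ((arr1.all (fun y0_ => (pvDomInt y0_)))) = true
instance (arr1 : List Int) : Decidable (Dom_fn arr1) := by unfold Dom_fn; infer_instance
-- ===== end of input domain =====

-- B replaces A's accumulate-and-flush state machine by a group-then-reduce two-level index
-- scan (sum each maximal negative run at once, then take the min); alternative decomposition, same cost.


-- ===== PORT A =====
-- loop step: if i<0 accumulate into sum, else flush sum (if non-zero) and reset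
def fnStep (p : List Int × Int) (i : Int) : List Int × Int :=
  if i < 0 then (p.1, p.2 + i)
  else if p.2 ≠ 0 then (p.1 ++ [p.2], 0) else (p.1, 0)

def fn (arr1 : List Int) : Int :=
  let p := arr1.foldl fnStep ([], 0)
  let st := if p.2 ≠ 0 then p.1 ++ [p.2] else p.1
  if st.isEmpty then -1 else ((PySem.List.min? st (fun x => x)).getD 0)

-- ===== PORT B =====
-- inner while loop of Source B: sum the run of negatives starting at index j (indices 0 ≤ j < n
-- are in range, so arr1[j] is exactly List.getD)
def fnRun (arr1 : List Int) (n j : Nat) (s : Int) : Int × Nat :=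
  if _h : j < n ∧ arr1.getD j 0 < 0 then fnRun arr1 n (j + 1) (s + arr1.getD j 0)
  else (s, j)
termination_by n - j
decreasing_by omega

-- cited by fnOuter's decreasing_by: the inner loop never moves the index backwards
theorem fnRun_le (arr1 : List Int) (k n j : Nat) (s : Int) (hk : n - j ≤ k) :
    j ≤ (fnRun arr1 n j s).2 := by
  induction k generalizing j s with
  | zero =>
    rw [fnRun, dif_neg (by omega)]
  | succ k ih =>
    rw [fnRun]
    by_cases h : j < n ∧ arr1.getD j 0 < 0
    · rw [dif_pos h]
      exact le_trans (by omega) (ih (j + 1) _ (by omega))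
    · rw [dif_neg h]

-- outer while loop of Source B: scan for run starts, append each run's sum
def fnOuter (arr1 : List Int) (n i : Nat) (sums : List Int) : List Int :=
  if h : i < n then
    if hc : arr1.getD i 0 < 0 then
      let p := fnRun arr1 n i 0
      fnOuter arr1 n p.2 (sums ++ [p.1])
    else fnOuter arr1 n (i + 1) sums
  else sums
termination_by n - i
decreasing_by
  · rw [fnRun, dif_pos ⟨h, hc⟩]
    have h2 := fnRun_le arr1 (n - (i + 1)) n (i + 1) (0 + arr1.getD i 0) (by omega)
    omega
  · omega

def fn_alt (arr1 : List Int) : Int :=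
  let sums := fnOuter arr1 arr1.length 0 []
  if sums.isEmpty then -1 else ((PySem.List.min? sums (fun x => x)).getD 0)

-- ===== PRECONDITION & SPEC =====
def Spec_fn (arr1 : List Int) (out : Int) : Prop := out = fn_alt arr1
instance (arr1 : List Int) (out : Int) : Decidable (Spec_fn arr1 out) := by unfold Spec_fn; infer_instance

-- ===== CLAIM (what is proved, stated in full; the proofs are below) =====
def Claim_equal_fn : Prop := ∀ (arr1 : List Int), Dom_fn arr1 → Spec_fn arr1 (fn arr1)

-- ===== LEMMAS AND PROOFS =====
-- Proof-only bridge: a structural version of B's run splitting over lists.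
def fnCollect (s : Int) (rest : List Int) : Int × List Int :=
  match rest with
  | [] => (s, [])
  | r :: rs => if r < 0 then fnCollect (s + r) rs else (s, rest)

theorem fnCollect_len (s : Int) (rest : List Int) : (fnCollect s rest).2.length ≤ rest.length := by
  induction rest generalizing s with
  | nil => simp [fnCollect]
  | cons r rs ih =>
    simp only [fnCollect]
    split
    · exact le_trans (ih _) (by simp)
    · simp

def fnRunSums (xs : List Int) : List Int :=
  match xs with
  | [] => []
  | x :: rest =>
    if x ≥ 0 then fnRunSums rest
    else
      let p := fnCollect x rest
      p.1 :: fnRunSums p.2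
termination_by xs.length
decreasing_by
  · simp
  · have := fnCollect_len x rest; simp; omega

-- A's post-loop flush
def fnFlush (p : List Int × Int) : List Int := if p.2 ≠ 0 then p.1 ++ [p.2] else p.1

-- Joint invariant: A's flushed fold equals st ++ the run-sums, both from the
-- zero state and from a pending negative state s.
theorem fn_inv (xs : List Int) :
    (∀ st, fnFlush (xs.foldl fnStep (st, 0)) = st ++ fnRunSums xs) ∧
    (∀ st s, s < 0 →
      fnFlush (xs.foldl fnStep (st, s)) =
        st ++ (fnCollect s xs).1 :: fnRunSums (fnCollect s xs).2) := by
  induction xs with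
  | nil =>
    constructor
    · intro st; simp [fnFlush, fnRunSums]
    · intro st s hs
      simp [fnFlush, fnCollect, fnRunSums, show s ≠ 0 by omega]
  | cons x rest ih =>
    constructor
    · intro st
      by_cases hx : x < 0
      · have h0 : fnStep (st, 0) x = (st, x) := by simp [fnStep, hx]
        rw [List.foldl_cons, h0, (ih.2) st x hx]
        simp [fnRunSums, show ¬ x ≥ 0 by omega]
      · have h0 : fnStep (st, 0) x = (st, 0) := by simp [fnStep, hx]
        rw [List.foldl_cons, h0, (ih.1) st]
        simp [fnRunSums, show x ≥ 0 by omega]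
    · intro st s hs
      by_cases hx : x < 0
      · have h0 : fnStep (st, s) x = (st, s + x) := by simp [fnStep, hx]
        rw [List.foldl_cons, h0, (ih.2) st (s + x) (by omega)]
        simp [fnCollect, hx]
      · have h0 : fnStep (st, s) x = (st ++ [s], 0) := by
          simp [fnStep, hx, show s ≠ 0 by omega]
        rw [List.foldl_cons, h0, (ih.1) (st ++ [s])]
        simp [fnCollect, fnRunSums, hx, show x ≥ 0 by omega]

-- B's inner index loop computes fnCollect on the dropped suffix.
theorem fnRun_eq (arr1 : List Int) (k j : Nat) (s : Int) (hk : arr1.length - j ≤ k) :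
    (fnRun arr1 arr1.length j s).1 = (fnCollect s (arr1.drop j)).1 ∧
    arr1.drop (fnRun arr1 arr1.length j s).2 = (fnCollect s (arr1.drop j)).2 := by
  induction k generalizing j s with
  | zero =>
    rw [fnRun, dif_neg (by omega)]
    rw [List.drop_eq_nil_of_le (by omega)]
    simp [fnCollect]
  | succ k ih =>
    rw [fnRun]
    by_cases hj : j < arr1.length
    · have hdrop : arr1.drop j = arr1[j] :: arr1.drop (j + 1) :=
        List.drop_eq_getElem_cons hj
      have hgd : arr1.getD j 0 = arr1[j] := List.getD_eq_getElem arr1 0 hj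
      by_cases hc : arr1[j] < 0
      · rw [dif_pos ⟨hj, by rwa [hgd]⟩, hdrop, hgd]
        simp only [fnCollect, if_pos hc]
        exact ih (j + 1) (s + arr1[j]) (by omega)
      · have hcD : ¬ arr1.getD j 0 < 0 := by rwa [hgd]
        rw [dif_neg (by tauto)]
        constructor
        · rw [hdrop]; simp [fnCollect, hc]
        · rw [hdrop]; simp [fnCollect, hc, ← hdrop]
    · rw [dif_neg (by omega)]
      rw [List.drop_eq_nil_of_le (by omega)]
      simp [fnCollect]

-- B's outer index loop computes sums ++ run-sums of the dropped suffix.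
theorem fnOuter_eq (arr1 : List Int) (k i : Nat) (sums : List Int)
    (hk : arr1.length - i ≤ k) :
    fnOuter arr1 arr1.length i sums = sums ++ fnRunSums (arr1.drop i) := by
  induction k generalizing i sums with
  | zero =>
    rw [fnOuter, dif_neg (by omega), List.drop_eq_nil_of_le (by omega)]
    simp [fnRunSums]
  | succ k ih =>
    rw [fnOuter]
    by_cases hi : i < arr1.length
    · have hdrop : arr1.drop i = arr1[i] :: arr1.drop (i + 1) :=
        List.drop_eq_getElem_cons hi
      have hgd : arr1.getD i 0 = arr1[i] := List.getD_eq_getElem arr1 0 hi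
      have hrs : fnRunSums (arr1[i] :: arr1.drop (i + 1)) =
          if arr1[i] ≥ 0 then fnRunSums (arr1.drop (i + 1))
          else (fnCollect arr1[i] (arr1.drop (i + 1))).1 ::
            fnRunSums (fnCollect arr1[i] (arr1.drop (i + 1))).2 := by
        rw [fnRunSums]
      by_cases hc : arr1[i] < 0
      · have hcD : arr1.getD i 0 < 0 := by rwa [hgd]
        rw [dif_pos hi, dif_pos hcD]
        have hrun1 : fnRun arr1 arr1.length i 0 =
            fnRun arr1 arr1.length (i + 1) arr1[i] := by
          rw [fnRun, dif_pos ⟨hi, hcD⟩, hgd, zero_add]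
        have hle : i + 1 ≤ (fnRun arr1 arr1.length (i + 1) arr1[i]).2 :=
          fnRun_le arr1 (arr1.length - (i + 1)) arr1.length (i + 1) _ (by omega)
        have heq := fnRun_eq arr1 k (i + 1) arr1[i] (by omega)
        have hlen2 : arr1.length - (fnRun arr1 arr1.length i 0).2 ≤ k := by
          rw [hrun1]; omega
        rw [ih _ _ hlen2, hdrop, hrs, if_neg (by omega), hrun1, heq.1, heq.2]
        simp
      · have hcD : ¬ arr1.getD i 0 < 0 := by rwa [hgd]
        rw [dif_pos hi, dif_neg hcD, ih (i + 1) sums (by omega), hdrop, hrs,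
          if_pos (by omega)]
    · rw [dif_neg hi, List.drop_eq_nil_of_le (by omega)]
      simp [fnRunSums]

theorem fn_eq (arr1 : List Int) : fn arr1 = fn_alt arr1 := by
  have hA := (fn_inv arr1).1 []
  simp only [List.nil_append] at hA
  have hB := fnOuter_eq arr1 arr1.length 0 [] (by omega)
  simp only [List.drop_zero, List.nil_append] at hB
  simp only [fn, fn_alt, fnFlush] at *
  rw [hA, hB]

-- ===== VERDICT (by name: the statement is the Claim_ definition above) =====
theorem fn_spec : Claim_equal_fn := by
  intro arr1 _
  unfold Spec_fn
  exact fn_eq arr1
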